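-- pv_equiv track=rewrite | github.com/leuel-a/competitive-programming | array/applyOperations.py | applyOperations
-- ===== SOURCE A (Python) =====
-- def applyOperations(nums: list[int]) -> list[int]:
--     for i in range(1, len(nums)):
--         if nums[i - 1] == nums[i]:
--             nums[i - 1] *= 2
--             nums[i] = 0
--
--     count = 0
--     for num in nums:
--         if num != 0:
--             nums[count] = num
--             count += 1
--
--     while count < len(nums):
--         nums[count] = 0
--         count += 1
--     return nums
-- ===== SOURCE B (Python) =====
-- def applyOperations(nums: list[int]) -> list[int]:
--     # Carry-pass rewrite: build the merged sequence with a running carry,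
--     # then filter nonzeros and pad with zeros (mutates nums in place like A).
--     if not nums:
--         return nums
--     out = []
--     c = nums[0]
--     for y in nums[1:]:
--         if c == y:
--             out.append(2 * c)
--             c = 0
--         else:
--             out.append(c)
--             c = y
--     out.append(c)
--     nonzero = [v for v in out if v != 0]
--     nums[:] = nonzero + [0] * (len(nums) - len(nonzero))
--     return nums
-- ===== Notes on version B (the rewrite author's own statement) =====
-- stated objective: alternative
-- what changed: Replaces A's three in-place index loops (index-based merge, two-pointer compaction, zero-fill while loop) by a carry-passing single pass that builds the merged sequence into a new list, followed by a filter of nonzeros padded with zeros.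
import Mathlib
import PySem

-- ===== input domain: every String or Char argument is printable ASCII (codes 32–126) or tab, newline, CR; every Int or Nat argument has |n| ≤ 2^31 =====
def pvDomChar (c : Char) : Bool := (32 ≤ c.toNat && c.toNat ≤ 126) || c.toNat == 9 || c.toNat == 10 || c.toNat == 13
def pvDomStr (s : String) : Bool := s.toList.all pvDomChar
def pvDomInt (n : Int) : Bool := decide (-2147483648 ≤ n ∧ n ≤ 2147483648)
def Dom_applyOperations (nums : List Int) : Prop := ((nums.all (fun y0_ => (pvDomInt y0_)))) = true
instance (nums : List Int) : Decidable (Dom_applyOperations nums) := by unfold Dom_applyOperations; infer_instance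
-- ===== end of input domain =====

-- B replaces A's in-place index loops by a recursive pairwise merge plus filter-and-pad
-- (same return value; like A, the Python B mutates the argument in place).

-- ===== PORT A =====
-- step of 'for i in range(1, len(nums)): if nums[i-1]==nums[i]: nums[i-1]*=2; nums[i]=0'
def pvMergeStep (l : List Int) (i : Int) : List Int :=
  if PySem.List.pyGetD l (i - 1) 0 = PySem.List.pyGetD l i 0 then
    PySem.List.pySetD (PySem.List.pySetD l (i - 1) (PySem.List.pyGetD l (i - 1) 0 * 2)) i 0
  else l

-- step of 'for num in nums: if num != 0: nums[count]=num; count+=1' (Python iterates the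
-- live list by index, so the read 'nums[i]' is from the current list — ported exactly so)
def pvCompactStep (st : List Int × Int) (i : Int) : List Int × Int :=
  if PySem.List.pyGetD st.1 i 0 ≠ 0 then
    (PySem.List.pySetD st.1 st.2 (PySem.List.pyGetD st.1 i 0), st.2 + 1)
  else st

def applyOperations (nums : List Int) : List Int :=
  let merged := (PySem.List.pyRange 1 (nums.length : Int) 1).foldl pvMergeStep nums
  let st := (PySem.List.pyRange 0 (merged.length : Int) 1).foldl pvCompactStep (merged, 0)
  -- 'while count < len(nums): nums[count] = 0; count += 1'
  (PySem.List.pyRange st.2 (st.1.length : Int) 1).foldl (fun l j => PySem.List.pySetD l j 0) st.1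

-- ===== PORT B =====
def applyOperations_alt (nums : List Int) : List Int :=
  match nums with
  | [] => nums
  | x :: xs =>
    let st := xs.foldl
      (fun (st : List Int × Int) y =>
        if st.2 = y then (st.1 ++ [2 * st.2], 0) else (st.1 ++ [st.2], y))
      ([], x)
    let out := st.1 ++ [st.2]
    let nonzero := out.filter (fun v => v ≠ 0)
    nonzero ++ List.replicate (nums.length - nonzero.length) 0

-- ===== PRECONDITION & SPEC =====
def Spec_applyOperations (nums : List Int) (out : List Int) : Prop := out = applyOperations_alt nums
instance (nums : List Int) (out : List Int) : Decidable (Spec_applyOperations nums out) := by unfold Spec_applyOperations; infer_instance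

-- ===== CLAIM (what is proved, stated in full; the proofs are below) =====
def Claim_equal_applyOperations : Prop := ∀ (nums : List Int), Dom_applyOperations nums → Spec_applyOperations nums (applyOperations nums)

-- ===== LEMMAS AND PROOFS =====

-- proof-side intermediate: the merged sequence both programs produce
def pvMergeRec : List Int → List Int
  | [] => []
  | [x] => [x]
  | x :: y :: rest =>
    if x = y then 2 * x :: pvMergeRec (0 :: rest) else x :: pvMergeRec (y :: rest)
termination_by xs => xs.length
decreasing_by all_goals simp

theorem length_pvMergeRec (xs : List Int) : (pvMergeRec xs).length = xs.length := by
  fun_induction pvMergeRec xs <;> simp_all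

theorem carryLoop_eq (xs : List Int) (out : List Int) (c : Int) :
    (xs.foldl
        (fun (st : List Int × Int) y =>
          if st.2 = y then (st.1 ++ [2 * st.2], 0) else (st.1 ++ [st.2], y))
        (out, c)).1
      ++ [(xs.foldl
        (fun (st : List Int × Int) y =>
          if st.2 = y then (st.1 ++ [2 * st.2], 0) else (st.1 ++ [st.2], y))
        (out, c)).2]
      = out ++ pvMergeRec (c :: xs) := by
  induction xs generalizing out c with
  | nil => simp [pvMergeRec]
  | cons y xs ih =>
    rw [List.foldl_cons]
    dsimp only
    by_cases hcy : c = y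
    · rw [if_pos hcy]
      have := ih (out ++ [2 * c]) 0
      simp only [List.append_assoc, List.singleton_append] at this ⊢
      rw [this]
      subst hcy
      simp [pvMergeRec]
    · rw [if_neg hcy]
      have := ih (out ++ [c]) y
      simp only [List.append_assoc, List.singleton_append] at this ⊢
      rw [this]
      rw [pvMergeRec, if_neg hcy]

theorem set_append_cons (out : List Int) (c v : Int) (t : List Int) :
    (out ++ c :: t).set out.length v = out ++ v :: t := by
  induction out with
  | nil => simp
  | cons a out ih => simp [ih]

theorem pyGetD_append_cons (out : List Int) (c : Int) (t : List Int) :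
    PySem.List.pyGetD (out ++ c :: t) (out.length : Int) 0 = c := by
  simp [List.getD_eq_getElem?_getD]

-- A's merge loop, run over the tail range, finishes the list exactly as pvMergeRec does.
theorem mergeFold_eq (rest : List Int) (out : List Int) (c : Int) :
    (PySem.List.pyRange ((out.length : Int) + 1) ((out.length : Int) + 1 + rest.length) 1).foldl
        pvMergeStep (out ++ c :: rest)
      = out ++ pvMergeRec (c :: rest) := by
  induction rest generalizing out c with
  | nil =>
    rw [PySem.List.pyRange_one_eq_nil (by simp)]
    simp [pvMergeRec]
  | cons y rest ih =>
    rw [PySem.List.pyRange_one_cons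
      (show (out.length : Int) + 1 < (out.length : Int) + 1 + ((y :: rest).length : Int) by
        simp)]
    have hstep : pvMergeStep (out ++ c :: y :: rest) ((out.length : Int) + 1)
        = if c = y then out ++ 2 * c :: 0 :: rest else out ++ c :: y :: rest := by
      have h1 : PySem.List.pyGetD (out ++ c :: y :: rest) ((out.length : Int) + 1 - 1) 0 = c := by
        simpa using pyGetD_append_cons out c (y :: rest)
      have h2 : PySem.List.pyGetD (out ++ c :: y :: rest) ((out.length : Int) + 1) 0 = y := by
        have := pyGetD_append_cons (out ++ [c]) y rest
        simpa [add_comm] using this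
      unfold pvMergeStep
      rw [h1, h2]
      by_cases hcy : c = y
      · subst hcy
        rw [if_pos rfl]
        have e1 : ((out.length : Int) + 1 - 1) = ((out.length : Nat) : Int) := by push_cast; ring
        rw [e1, PySem.List.pySetD_natCast, set_append_cons]
        have e2 : ((out.length : Int) + 1) = (((out ++ [c * 2]).length : Nat) : Int) := by
          push_cast; simp
        rw [e2, PySem.List.pySetD_natCast]
        have := set_append_cons (out ++ [c * 2]) c 0 rest
        simp only [List.append_assoc, List.cons_append, List.nil_append] at this
        simp [mul_comm]
      · rw [if_neg hcy, if_neg hcy]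
    rw [List.foldl_cons, hstep]
    by_cases hcy : c = y
    · rw [if_pos hcy]
      have hre : out ++ 2 * c :: 0 :: rest = (out ++ [2 * c]) ++ 0 :: rest := by simp
      have hrng : PySem.List.pyRange ((out.length : Int) + 1 + 1) ((out.length : Int) + 1 + (↑rest.length + 1)) 1
          = PySem.List.pyRange (((out ++ [2 * c]).length : Int) + 1) (((out ++ [2 * c]).length : Int) + 1 + rest.length) 1 := by
        congr 1 <;> simp <;> ring
      rw [hre]
      rw [show ((y :: rest).length : Int) = (rest.length : Int) + 1 by simp, hrng, ih]
      subst hcy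
      simp [pvMergeRec]
    · rw [if_neg hcy]
      have hre : out ++ c :: y :: rest = (out ++ [c]) ++ y :: rest := by simp
      have hrng : PySem.List.pyRange ((out.length : Int) + 1 + 1) ((out.length : Int) + 1 + (↑rest.length + 1)) 1
          = PySem.List.pyRange (((out ++ [c]).length : Int) + 1) (((out ++ [c]).length : Int) + 1 + rest.length) 1 := by
        congr 1 <;> simp <;> ring
      rw [hre]
      rw [show ((y :: rest).length : Int) = (rest.length : Int) + 1 by simp, hrng, ih]
      rw [pvMergeRec, if_neg hcy]
      simp

theorem merge_eq (nums : List Int) :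
    (PySem.List.pyRange 1 (nums.length : Int) 1).foldl pvMergeStep nums = pvMergeRec nums := by
  cases nums with
  | nil => rw [PySem.List.pyRange_one_eq_nil (by simp)]; simp [pvMergeRec]
  | cons x xs =>
    have h := mergeFold_eq xs [] x
    simpa [show (1 : Int) + (xs.length : Int) = (xs.length : Int) + 1 by ring] using h

-- A's compaction loop keeps the filtered prefix and the untouched suffix.
theorem compactFold_eq (m : List Int) (k : Nat) (hk : k ≤ m.length)
    (F : List Int) (hF : F = (m.take k).filter (fun v => v ≠ 0)) :
    (PySem.List.pyRange (k : Int) (m.length : Int) 1).foldl pvCompactStep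
        (F ++ m.drop F.length, (F.length : Int))
      = (m.filter (fun v => v ≠ 0) ++ m.drop (m.filter (fun v => v ≠ 0)).length,
         ((m.filter (fun v => v ≠ 0)).length : Int)) := by
  generalize hgen : m.length - k = n
  induction n generalizing k F with
  | zero =>
    have hk' : k = m.length := by omega
    subst hk'
    rw [PySem.List.pyRange_one_eq_nil (by simp)]
    simp only [List.take_length] at hF
    subst hF
    rfl
  | succ n ih =>
    have hklt : k < m.length := by omega
    have hFk : F.length ≤ k := by
      calc F.length ≤ (m.take k).length := hF ▸ List.length_filter_le _ _
        _ ≤ k := by simp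
    rw [PySem.List.pyRange_one_cons (show (k : Int) < (m.length : Int) by exact_mod_cast hklt)]
    rw [List.foldl_cons]
    have hread : PySem.List.pyGetD (F ++ m.drop F.length) (k : Int) 0 = m[k] := by
      rw [PySem.List.pyGetD_natCast, List.getD_eq_getElem?_getD,
        List.getElem?_append_right hFk, List.getElem?_drop]
      rw [show F.length + (k - F.length) = k by omega]
      simp [List.getElem?_eq_getElem hklt]
    have hstep : pvCompactStep (F ++ m.drop F.length, (F.length : Int)) (k : Int)
        = if m[k] ≠ 0 then
            ((F ++ [m[k]]) ++ m.drop (F.length + 1), ((F.length : Int) + 1))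
          else (F ++ m.drop F.length, (F.length : Int)) := by
      unfold pvCompactStep
      rw [hread]
      by_cases hz : m[k] = 0
      · rw [if_neg (by simp [hz]), if_neg (by simp [hz])]
      · rw [if_pos hz, if_pos hz]
        have hFm : F.length < m.length := by omega
        rw [PySem.List.pySetD_natCast, List.drop_eq_getElem_cons hFm, set_append_cons]
        simp
    rw [hstep]
    have hcast : (k : Int) + 1 = ((k + 1 : Nat) : Int) := by push_cast; ring
    by_cases hz : m[k] = 0
    · rw [if_neg (by simp [hz]), hcast]
      exact ih (k + 1) (by omega) F
        (by rw [hF, List.take_add_one, List.getElem?_eq_getElem hklt]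
            simp [List.filter_append, hz])
        (by omega)
    · rw [if_pos (by simp [hz]), hcast]
      have hF' : F ++ [m[k]] = (m.take (k + 1)).filter (fun v => v ≠ 0) := by
        rw [List.take_add_one, List.getElem?_eq_getElem hklt]
        rw [List.filter_append, ← hF]
        simp [hz]
      have h2 := ih (k + 1) (by omega) (F ++ [m[k]]) hF' (by omega)
      simpa using h2

-- A's zero-filling while loop overwrites the suffix with zeros.
theorem fillFold_eq (l : List Int) (j : Nat) (hj : j ≤ l.length) :
    (PySem.List.pyRange (j : Int) (l.length : Int) 1).foldl
        (fun l i => PySem.List.pySetD l i 0) l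
      = l.take j ++ List.replicate (l.length - j) 0 := by
  generalize hgen : l.length - j = n
  induction n generalizing l j with
  | zero =>
    have hj' : j = l.length := by omega
    subst hj'
    rw [PySem.List.pyRange_one_eq_nil (by simp)]
    simp
  | succ n ih =>
    have hjlt : j < l.length := by omega
    rw [PySem.List.pyRange_one_cons (show (j : Int) < (l.length : Int) by exact_mod_cast hjlt)]
    rw [List.foldl_cons, PySem.List.pySetD_natCast]
    have hcast : (j : Int) + 1 = ((j + 1 : Nat) : Int) := by push_cast; ring
    have hlen : (l.set j 0).length = l.length := by simp
    have h2 := ih (l.set j 0) (j + 1) (by omega) (by omega)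
    rw [hcast]
    rw [show ((l.set j 0).length : Int) = (l.length : Int) by rw [hlen]] at h2
    rw [h2]
    have htake : (l.set j 0).take (j + 1) = l.take j ++ [0] := by
      rw [List.take_set, List.take_add_one, List.getElem?_eq_getElem hjlt]
      have := set_append_cons (l.take j) (l[j]) 0 []
      rw [List.length_take, Nat.min_eq_left (le_of_lt hjlt)] at this
      simpa using this
    rw [htake]
    simp [List.replicate_succ]

-- ===== VERDICT (by name: the statement is the Claim_ definition above) =====
theorem alt_eq (nums : List Int) :
    applyOperations_alt nums
      = (pvMergeRec nums).filter (fun v => v ≠ 0)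
        ++ List.replicate (nums.length - ((pvMergeRec nums).filter (fun v => v ≠ 0)).length) 0 := by
  cases nums with
  | nil => simp [applyOperations_alt, pvMergeRec]
  | cons x xs =>
    unfold applyOperations_alt
    dsimp only
    rw [carryLoop_eq xs [] x]
    simp

theorem applyOperations_spec : Claim_equal_applyOperations := by
  intro nums _
  show applyOperations nums = applyOperations_alt nums
  rw [alt_eq]
  unfold applyOperations
  dsimp only
  rw [merge_eq]
  have hfl : ((pvMergeRec nums).filter (fun v => v ≠ 0)).length ≤ (pvMergeRec nums).length :=
    List.length_filter_le _ _
  have h0 := compactFold_eq (pvMergeRec nums) 0 (Nat.zero_le _) [] (by simp)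
  simp only [List.nil_append, List.drop_zero, List.length_nil, Nat.cast_zero, Nat.cast_ofNat] at h0
  rw [h0]
  have hlen2 : ((pvMergeRec nums).filter (fun v => v ≠ 0) ++
      (pvMergeRec nums).drop ((pvMergeRec nums).filter (fun v => v ≠ 0)).length).length
      = (pvMergeRec nums).length := by
    rw [List.length_append, List.length_drop]
    omega
  have hf := fillFold_eq ((pvMergeRec nums).filter (fun v => v ≠ 0) ++
      (pvMergeRec nums).drop ((pvMergeRec nums).filter (fun v => v ≠ 0)).length)
      ((pvMergeRec nums).filter (fun v => v ≠ 0)).length (by rw [hlen2]; exact hfl)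
  rw [hf, hlen2]
  rw [List.take_left']
  · rw [length_pvMergeRec]
  · rfl
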